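-- pv_equiv track=rewrite | github.com/roytian1992/ResearchForesight | scripts/build_full_expansion_four_domains.py | likely_bucket_and_venue
-- ===== SOURCE A (Python) =====
-- from typing import Any, Dict, Iterable, List, Tuple
--
-- def likely_bucket_and_venue(stats: Dict[str, Any]) -> Tuple[str, str, Dict[str, int]]:
--     top_buckets = dict(stats.get('top_venue_buckets') or {})
--     conf_buckets = {str(k): int(v) for k, v in top_buckets.items() if str(k) not in {'other', 'unknown'} and int(v or 0) > 0}
--     likely_bucket = ''
--     if conf_buckets:
--         likely_bucket = max(conf_buckets.items(), key=lambda kv: (kv[1], kv[0]))[0]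
--     top_venues = dict(stats.get('top_venues') or {})
--     likely_venue = ''
--     if likely_bucket:
--         venue_rows = [
--             (name, int(count or 0))
--             for name, count in top_venues.items()
--             if str(name) not in {'arXiv.org', 'unknown'} and int(count or 0) > 0
--         ]
--         if venue_rows:
--             likely_venue = sorted(venue_rows, key=lambda kv: (-kv[1], kv[0]))[0][0]
--     return likely_bucket, likely_venue, conf_buckets
-- ===== SOURCE B (Python) =====
-- def likely_bucket_and_venue(stats):
--     # Single-pass argmax loops instead of max()/sorted(); same filters and tie-breaks.
--     conf_buckets = {}
--     likely_bucket = ''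
--     best_bcount = 0
--     for k, v in dict(stats.get('top_venue_buckets') or {}).items():
--         ks = str(k)
--         vi = int(v or 0)
--         if ks not in ('other', 'unknown') and vi > 0:
--             conf_buckets[ks] = vi
--             if vi > best_bcount or (vi == best_bcount and ks > likely_bucket):
--                 likely_bucket, best_bcount = ks, vi
--     likely_venue = ''
--     if likely_bucket:
--         best_vcount = 0
--         for name, count in dict(stats.get('top_venues') or {}).items():
--             ci = int(count or 0)
--             if str(name) not in ('arXiv.org', 'unknown') and ci > 0:
--                 if ci > best_vcount or (ci == best_vcount and name < likely_venue):
--                     likely_venue, best_vcount = name, ci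
--     return likely_bucket, likely_venue, conf_buckets
-- ===== Notes on version B (the rewrite author's own statement) =====
-- stated objective: alternative
-- what changed: Replaces max(items, key=...) over the bucket dict and the build-list-then-sort venue selection with two single-pass running-argmax loops fused into the filtering passes (no venue_rows list, no sort), preserving both tie-break directions.
import Mathlib
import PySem

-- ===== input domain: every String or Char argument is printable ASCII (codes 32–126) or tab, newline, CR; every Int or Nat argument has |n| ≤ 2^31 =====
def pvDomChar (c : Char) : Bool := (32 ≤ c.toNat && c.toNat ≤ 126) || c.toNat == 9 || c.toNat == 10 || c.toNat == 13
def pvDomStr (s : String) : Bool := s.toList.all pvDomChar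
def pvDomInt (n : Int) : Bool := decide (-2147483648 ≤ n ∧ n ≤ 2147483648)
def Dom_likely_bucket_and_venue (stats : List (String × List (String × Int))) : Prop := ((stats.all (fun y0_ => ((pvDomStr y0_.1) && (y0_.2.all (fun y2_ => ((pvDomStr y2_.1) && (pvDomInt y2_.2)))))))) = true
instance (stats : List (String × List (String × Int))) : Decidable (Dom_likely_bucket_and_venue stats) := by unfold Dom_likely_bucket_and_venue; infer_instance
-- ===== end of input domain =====

-- B replaces A's max()-over-dict-items and build-list-then-sort venue pick by single-pass
-- running-argmax loops fused into the filtering passes (objective: alternative, same cost class).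

-- int(v or 0) on an Int argument (identity on Int: 'v or 0' is v unless v == 0)
def pvOr0 (v : Int) : Int := if v = 0 then 0 else v

-- ===== PORT A =====
def likely_bucket_and_venue (stats : List (String × List (String × Int))) : String × String × (List (String × Int)) :=
  let statsD := PySem.Dict.ofList stats
  -- top_buckets = dict(stats.get('top_venue_buckets') or {})  (None or empty → empty dict)
  let top_buckets := PySem.Dict.ofList ((statsD.get? "top_venue_buckets").getD [])
  -- conf_buckets = {str(k): int(v) for k, v in … if str(k) not in {'other','unknown'} and int(v or 0) > 0}
  let conf_buckets := top_buckets.items.foldl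
    (fun d kv =>
      if (!(kv.1 == "other") && !(kv.1 == "unknown")) && decide (0 < pvOr0 kv.2) then
        d.insert kv.1 kv.2
      else d) PySem.Dict.empty
  let likely_bucket :=
    if conf_buckets.items ≠ [] then
      -- max(conf_buckets.items(), key=lambda kv: (kv[1], kv[0]))[0]
      match PySem.List.max2? conf_buckets.items (fun kv => kv.2) (fun kv => kv.1) with
      | some m => m.1
      | none => ""          -- unreachable totality default (items nonempty here)
    else ""
  let top_venues := PySem.Dict.ofList ((statsD.get? "top_venues").getD [])
  let likely_venue :=
    if likely_bucket ≠ "" then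
      let venue_rows :=
        (top_venues.items.filter
          (fun kv => (!(kv.1 == "arXiv.org") && !(kv.1 == "unknown")) && decide (0 < pvOr0 kv.2))).map
          (fun kv => (kv.1, pvOr0 kv.2))
      if venue_rows ≠ [] then
        -- sorted(venue_rows, key=lambda kv: (-kv[1], kv[0]))[0][0]
        match PySem.List.sorted2 venue_rows (fun kv => -kv.2) (fun kv => kv.1) with
        | m :: _ => m.1
        | [] => ""          -- unreachable totality default (venue_rows nonempty here)
      else ""
    else ""
  (likely_bucket, likely_venue, conf_buckets.items)

-- ===== PORT B =====
def likely_bucket_and_venue_alt (stats : List (String × List (String × Int))) : String × String × (List (String × Int)) :=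
  let statsD := PySem.Dict.ofList stats
  -- one pass over dict(stats.get('top_venue_buckets') or {}): build conf_buckets and track the
  -- running best (higher count, tie → lexicographically larger name)
  let st := ((PySem.Dict.ofList ((statsD.get? "top_venue_buckets").getD [])).items).foldl
    (fun (s : PySem.Dict String Int × String × Int) kv =>
      if (!(kv.1 == "other") && !(kv.1 == "unknown")) && decide (0 < pvOr0 kv.2) then
        let conf := s.1.insert kv.1 (pvOr0 kv.2)
        if decide (s.2.2 < pvOr0 kv.2) || (decide (pvOr0 kv.2 = s.2.2) && decide (s.2.1 < kv.1)) then
          (conf, kv.1, pvOr0 kv.2)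
        else (conf, s.2.1, s.2.2)
      else s)
    (PySem.Dict.empty, "", 0)
  let likely_bucket := st.2.1
  let likely_venue :=
    if likely_bucket ≠ "" then
      -- one pass over dict(stats.get('top_venues') or {}): running best
      -- (higher count, tie → lexicographically smaller name); no list, no sort
      (((PySem.Dict.ofList ((statsD.get? "top_venues").getD [])).items).foldl
        (fun (s : String × Int) kv =>
          if (!(kv.1 == "arXiv.org") && !(kv.1 == "unknown")) && decide (0 < pvOr0 kv.2) then
            if decide (s.2 < pvOr0 kv.2) || (decide (pvOr0 kv.2 = s.2) && decide (kv.1 < s.1)) then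
              (kv.1, pvOr0 kv.2)
            else s
          else s)
        ("", 0)).1
    else ""
  (likely_bucket, likely_venue, st.1.items)

-- ===== PRECONDITION & SPEC =====
def Spec_likely_bucket_and_venue (stats : List (String × List (String × Int))) (out : String × String × (List (String × Int))) : Prop := out = likely_bucket_and_venue_alt stats
instance (stats : List (String × List (String × Int))) (out : String × String × (List (String × Int))) : Decidable (Spec_likely_bucket_and_venue stats out) := by unfold Spec_likely_bucket_and_venue; infer_instance

-- ===== CLAIM (what is proved, stated in full; the proofs are below) =====
def Claim_equal_likely_bucket_and_venue : Prop := ∀ (stats : List (String × List (String × Int))), Dom_likely_bucket_and_venue stats → Spec_likely_bucket_and_venue stats (likely_bucket_and_venue stats)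

-- ===== LEMMAS AND PROOFS =====

@[simp] theorem pvOr0_eq (v : Int) : pvOr0 v = v := by
  unfold pvOr0; split <;> omega

-- running argmax (higher count, tie: larger name) / argmin (higher count, tie: smaller name)
def pvArgMax (b kv : String × Int) : String × Int :=
  if decide (b.2 < kv.2) || (decide (kv.2 = b.2) && decide (b.1 < kv.1)) then kv else b
def pvArgMin (b kv : String × Int) : String × Int :=
  if decide (b.2 < kv.2) || (decide (kv.2 = b.2) && decide (kv.1 < b.1)) then kv else b

theorem max2?_cons_eq (m : List (String × Int)) : ∀ b : String × Int,
    PySem.List.max2? (b :: m) (fun kv => kv.2) (fun kv => kv.1) = some (m.foldl pvArgMax b) := by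
  induction m with
  | nil => intro b; rfl
  | cons z t ih =>
    intro b
    have key : PySem.List.max2? (b :: z :: t) (fun kv => kv.2) (fun kv => kv.1)
        = PySem.List.max2? (pvArgMax b z :: t) (fun kv => kv.2) (fun kv => kv.1) := by
      simp only [PySem.List.max2?, List.foldl_cons]
      congr 1
      unfold pvArgMax
      by_cases h1 : b.2 < z.2
      · simp [h1]
      · by_cases h2 : z.2 = b.2 <;> by_cases h3 : b.1 < z.1 <;> simp [h1, h2, h3] <;> omega
    rw [key, ih, List.foldl_cons]

theorem pvArgMin_eq_ite (a x : String × Int) :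
    pvArgMin a x = if (decide (-x.2 < -a.2) || !decide (-a.2 < -x.2) && decide (x.1 < a.1)) = true then x else a := by
  unfold pvArgMin
  rcases lt_trichotomy a.2 x.2 with h | h | h
  · simp [h, show (-x.2 < -a.2) from by omega]
  · simp [show (x.2 = a.2) from by omega]
  · simp [show ¬(a.2 < x.2) from by omega, show ¬(x.2 = a.2) from by omega,
      show ¬(-x.2 < -a.2) from by omega, show (-a.2 < -x.2) from by omega]

theorem head?_foldl_insertBy (m : List (String × Int)) : ∀ (acc : List (String × Int)) (b : String × Int),
    acc.head? = some b →
    ((m.foldl (fun acc x => PySem.List.insertBy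
        (fun a b => decide (-a.2 < -b.2) || !decide (-b.2 < -a.2) && decide (a.1 < b.1)) x acc) acc).head?)
      = some (m.foldl pvArgMin b) := by
  induction m with
  | nil => intro acc b hh; simpa using hh
  | cons x t ih =>
    intro acc b hh
    cases acc with
    | nil => simp at hh
    | cons a as =>
      simp only [List.head?_cons, Option.some.injEq] at hh
      subst hh
      simp only [List.foldl_cons]
      apply ih
      simp only [PySem.List.insertBy]
      rw [pvArgMin_eq_ite]
      split <;> simp

theorem sorted2_cons_head? (m : List (String × Int)) (b : String × Int) :
    (PySem.List.sorted2 (b :: m) (fun kv => -kv.2) (fun kv => kv.1) false).head?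
      = some (m.foldl pvArgMin b) := by
  simp only [PySem.List.sorted2, List.foldl_cons, Bool.false_eq_true, if_false]
  apply head?_foldl_insertBy
  simp [PySem.List.insertBy]

-- A's filtered dict rebuild lists exactly the filtered items (keys are nodup)
theorem conf_items_eq (l : List (String × Int)) (hnd : (l.map (fun kv => kv.1)).Nodup) :
    (l.foldl (fun d kv =>
        if (!(kv.1 == "other") && !(kv.1 == "unknown")) && decide (0 < kv.2) then d.insert kv.1 kv.2 else d)
      PySem.Dict.empty).items
      = l.filter (fun kv => (!(kv.1 == "other") && !(kv.1 == "unknown")) && decide (0 < kv.2)) := by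
  have h2 : (l.foldl (fun d kv =>
        if (!(kv.1 == "other") && !(kv.1 == "unknown")) && decide (0 < kv.2) then d.insert kv.1 kv.2 else d)
      PySem.Dict.empty)
      = (l.filter (fun kv => (!(kv.1 == "other") && !(kv.1 == "unknown")) && decide (0 < kv.2))).foldl
          (fun (d : PySem.Dict String Int) kv => d.insert kv.1 kv.2) PySem.Dict.empty :=
    PySem.List.foldl_if_eq_foldl_filter _ (fun (d : PySem.Dict String Int) kv => d.insert kv.1 kv.2) l _
  rw [h2]
  have h3 : ((l.filter (fun kv => (!(kv.1 == "other") && !(kv.1 == "unknown")) && decide (0 < kv.2))).foldl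
        (fun (d : PySem.Dict String Int) kv => d.insert kv.1 kv.2) PySem.Dict.empty).items
      = PySem.Dict.empty.items
        ++ (l.filter (fun kv => (!(kv.1 == "other") && !(kv.1 == "unknown")) && decide (0 < kv.2))).map
            (fun kv => (kv.1, kv.2)) :=
    PySem.Dict.items_foldl_insert_fresh _ (fun (kv : String × Int) => kv.1) (fun (kv : String × Int) => kv.2) _
      (fun a _ => PySem.Dict.contains_empty _)
      (((List.filter_sublist).map (fun (kv : String × Int) => kv.1)).nodup hnd)
  rw [h3]
  simp [PySem.Dict.empty]

-- B's triple-state fold splits into the dict fold and the best-pair fold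
theorem foldB_split (l : List (String × Int)) :
    l.foldl (fun (s : PySem.Dict String Int × String × Int) kv =>
        if (!(kv.1 == "other") && !(kv.1 == "unknown")) && decide (0 < kv.2) then
          if decide (s.2.2 < kv.2) || (decide (kv.2 = s.2.2) && decide (s.2.1 < kv.1)) then
            (s.1.insert kv.1 kv.2, kv.1, kv.2)
          else (s.1.insert kv.1 kv.2, s.2.1, s.2.2)
        else s)
      (PySem.Dict.empty, "", 0)
      = (l.foldl (fun d kv =>
            if (!(kv.1 == "other") && !(kv.1 == "unknown")) && decide (0 < kv.2) then d.insert kv.1 kv.2 else d)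
          PySem.Dict.empty,
         l.foldl (fun b kv =>
            if (!(kv.1 == "other") && !(kv.1 == "unknown")) && decide (0 < kv.2) then pvArgMax b kv else b)
          ("", 0)) := by
  have hstep : (fun (s : PySem.Dict String Int × String × Int) kv =>
        if (!(kv.1 == "other") && !(kv.1 == "unknown")) && decide (0 < kv.2) then
          if decide (s.2.2 < kv.2) || (decide (kv.2 = s.2.2) && decide (s.2.1 < kv.1)) then
            (s.1.insert kv.1 kv.2, kv.1, kv.2)
          else (s.1.insert kv.1 kv.2, s.2.1, s.2.2)
        else s)
      = (fun (s : PySem.Dict String Int × String × Int) kv =>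
          ((fun d kv => if (!(kv.1 == "other") && !(kv.1 == "unknown")) && decide (0 < kv.2)
              then d.insert kv.1 kv.2 else d) s.1 kv,
           (fun b kv => if (!(kv.1 == "other") && !(kv.1 == "unknown")) && decide (0 < kv.2)
              then pvArgMax b kv else b) s.2 kv)) := by
    funext s kv
    rcases s with ⟨d, bn, bc⟩
    rcases kv with ⟨k, v⟩
    unfold pvArgMax
    by_cases hp : ((!(k == "other") && !(k == "unknown")) && decide (0 < v)) = true <;>
      simp only [hp] <;> split_ifs <;> rfl
  rw [hstep]
  exact PySem.List.foldl_prod_mk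
    (fun (d : PySem.Dict String Int) kv =>
      if (!(kv.1 == "other") && !(kv.1 == "unknown")) && decide (0 < kv.2) then d.insert kv.1 kv.2 else d)
    (fun (b : String × Int) kv =>
      if (!(kv.1 == "other") && !(kv.1 == "unknown")) && decide (0 < kv.2) then pvArgMax b kv else b)
    l PySem.Dict.empty ("", 0)

theorem bucket_eq (m : List (String × Int)) (hpos : ∀ kv ∈ m, (0:Int) < kv.2) :
    (if m ≠ [] then
      match PySem.List.max2? m (fun kv => kv.2) (fun kv => kv.1) with
      | some kv => kv.1
      | none => ""
     else "") = (m.foldl pvArgMax ("", 0)).1 := by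
  cases m with
  | nil => rfl
  | cons y t =>
    have hy : (0:Int) < y.2 := hpos y (by simp)
    have h0 : pvArgMax ("", 0) y = y := by unfold pvArgMax; simp [hy]
    simp only [ne_eq, reduceCtorEq, not_false_iff, if_true, max2?_cons_eq, List.foldl_cons, h0]

theorem venue_eq (m : List (String × Int)) (hpos : ∀ kv ∈ m, (0:Int) < kv.2) :
    (if m ≠ [] then
      match PySem.List.sorted2 m (fun kv => -kv.2) (fun kv => kv.1) with
      | x :: _ => x.1
      | [] => ""
     else "") = (m.foldl pvArgMin ("", 0)).1 := by
  cases m with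
  | nil => rfl
  | cons y t =>
    have hy : (0:Int) < y.2 := hpos y (by simp)
    have h0 : pvArgMin ("", 0) y = y := by unfold pvArgMin; simp [hy]
    have hh := sorted2_cons_head? t y
    simp only [ne_eq, reduceCtorEq, not_false_iff, if_true, List.foldl_cons, h0]
    cases hs : PySem.List.sorted2 (y :: t) (fun kv => -kv.2) (fun kv => kv.1) false with
    | nil =>
      rw [hs] at hh
      simp at hh
    | cons x xs =>
      rw [hs] at hh
      simp only [List.head?_cons, Option.some.injEq] at hh
      show x.1 = (List.foldl pvArgMin y t).1
      exact congrArg Prod.fst hh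

theorem main_eq : ∀ stats, likely_bucket_and_venue stats = likely_bucket_and_venue_alt stats := by
  intro stats
  unfold likely_bucket_and_venue likely_bucket_and_venue_alt
  simp only [pvOr0_eq]
  rw [foldB_split]
  set lb := (PySem.Dict.ofList (((PySem.Dict.ofList stats).get? "top_venue_buckets").getD [])).items with hlb
  set lv := (PySem.Dict.ofList (((PySem.Dict.ofList stats).get? "top_venues").getD [])).items with hlv
  have hnd : (lb.map (fun kv => kv.1)).Nodup := PySem.Dict.nodup_keys_ofList _
  have hconf := conf_items_eq lb hnd
  have hposb : ∀ kv ∈ lb.filter (fun kv => (!(kv.1 == "other") && !(kv.1 == "unknown")) && decide (0 < kv.2)),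
      (0:Int) < kv.2 := by
    intro kv hm
    have := List.of_mem_filter hm
    simp only [Bool.and_eq_true, decide_eq_true_eq] at this
    exact this.2
  have hposv : ∀ kv ∈ lv.filter (fun kv => (!(kv.1 == "arXiv.org") && !(kv.1 == "unknown")) && decide (0 < kv.2)),
      (0:Int) < kv.2 := by
    intro kv hm
    have := List.of_mem_filter hm
    simp only [Bool.and_eq_true, decide_eq_true_eq] at this
    exact this.2
  have hbestb : (lb.foldl (fun b kv =>
        if (!(kv.1 == "other") && !(kv.1 == "unknown")) && decide (0 < kv.2) then pvArgMax b kv else b) ("", 0))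
      = (lb.filter (fun kv => (!(kv.1 == "other") && !(kv.1 == "unknown")) && decide (0 < kv.2))).foldl
          pvArgMax ("", 0) :=
    PySem.List.foldl_if_eq_foldl_filter _ pvArgMax lb _
  have hbestv : (lv.foldl (fun b kv =>
        if (!(kv.1 == "arXiv.org") && !(kv.1 == "unknown")) && decide (0 < kv.2) then pvArgMin b kv else b) ("", 0))
      = (lv.filter (fun kv => (!(kv.1 == "arXiv.org") && !(kv.1 == "unknown")) && decide (0 < kv.2))).foldl
          pvArgMin ("", 0) :=
    PySem.List.foldl_if_eq_foldl_filter _ pvArgMin lv _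
  have hbucket : (if (lb.foldl (fun d kv =>
        if (!(kv.1 == "other") && !(kv.1 == "unknown")) && decide (0 < kv.2) then d.insert kv.1 kv.2 else d)
      PySem.Dict.empty).items ≠ [] then
      match PySem.List.max2? ((lb.foldl (fun d kv =>
          if (!(kv.1 == "other") && !(kv.1 == "unknown")) && decide (0 < kv.2) then d.insert kv.1 kv.2 else d)
        PySem.Dict.empty).items) (fun kv => kv.2) (fun kv => kv.1) with
      | some kv => kv.1
      | none => ""
     else "")
      = (lb.foldl (fun b kv =>
          if (!(kv.1 == "other") && !(kv.1 == "unknown")) && decide (0 < kv.2) then pvArgMax b kv else b)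
        ("", 0)).1 := by
    rw [hconf, hbestb]
    exact bucket_eq _ hposb
  have hvenue : (if (lv.filter (fun kv => (!(kv.1 == "arXiv.org") && !(kv.1 == "unknown")) && decide (0 < kv.2))).map
        (fun kv => (kv.1, kv.2)) ≠ [] then
      match PySem.List.sorted2 ((lv.filter
          (fun kv => (!(kv.1 == "arXiv.org") && !(kv.1 == "unknown")) && decide (0 < kv.2))).map
          (fun kv => (kv.1, kv.2))) (fun kv => -kv.2) (fun kv => kv.1) with
      | x :: _ => x.1
      | [] => ""
     else "")
      = (lv.foldl (fun b kv =>
          if (!(kv.1 == "arXiv.org") && !(kv.1 == "unknown")) && decide (0 < kv.2) then pvArgMin b kv else b)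
        ("", 0)).1 := by
    rw [hbestv]
    have hmap : (lv.filter (fun kv => (!(kv.1 == "arXiv.org") && !(kv.1 == "unknown")) && decide (0 < kv.2))).map
        (fun kv => (kv.1, kv.2))
        = lv.filter (fun kv => (!(kv.1 == "arXiv.org") && !(kv.1 == "unknown")) && decide (0 < kv.2)) := by
      simp
    rw [hmap]
    exact venue_eq _ hposv
  refine Prod.ext ?_ (Prod.ext ?_ ?_)
  · exact hbucket
  · simp only []
    rw [hbucket]
    split <;> first | rfl | (exact hvenue)
  · rfl

-- ===== VERDICT (by name: the statement is the Claim_ definition above) =====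
theorem likely_bucket_and_venue_spec : Claim_equal_likely_bucket_and_venue := by
  intro stats _
  unfold Spec_likely_bucket_and_venue
  exact main_eq stats
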